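-- pv_equiv track=rewrite | github.com/duongsocyeu162k-byte/tichhop-git | src/etl/mongodb_storage.py | _categorize_skill
-- ===== SOURCE A (Python) =====
-- def _categorize_skill(skill: str) -> str:
--     """
--     Categorize skill into predefined categories.
--
--     Args:
--         skill: Skill name
--
--     Returns:
--         str: Skill category
--     """
--     skill_lower = skill.lower()
--
--     if any(tech in skill_lower for tech in ['python', 'java', 'javascript', 'sql', 'r', 'scala', 'go', 'c++', 'c#']):
--         return 'Programming Languages'
--     elif any(tech in skill_lower for tech in ['machine learning', 'ml', 'deep learning', 'data science', 'analytics']):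
--         return 'Data Science & ML'
--     elif any(tech in skill_lower for tech in ['tableau', 'power bi', 'excel', 'matplotlib', 'seaborn']):
--         return 'Visualization & BI'
--     elif any(tech in skill_lower for tech in ['aws', 'azure', 'gcp', 'docker', 'kubernetes']):
--         return 'Cloud & DevOps'
--     elif any(tech in skill_lower for tech in ['mysql', 'postgresql', 'mongodb', 'redis', 'elasticsearch']):
--         return 'Databases'
--     elif any(tech in skill_lower for tech in ['html', 'css', 'react', 'angular', 'vue', 'node.js']):
--         return 'Web Technologies'
--     else:
--         return 'Other'
-- ===== SOURCE B (Python) =====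
-- _KEYWORD_INFO = {}
-- for _i, (_cat, _kws) in enumerate([
--         ('Programming Languages', ['python', 'java', 'javascript', 'sql', 'r', 'scala', 'go', 'c++', 'c#']),
--         ('Data Science & ML', ['machine learning', 'ml', 'deep learning', 'data science', 'analytics']),
--         ('Visualization & BI', ['tableau', 'power bi', 'excel', 'matplotlib', 'seaborn']),
--         ('Cloud & DevOps', ['aws', 'azure', 'gcp', 'docker', 'kubernetes']),
--         ('Databases', ['mysql', 'postgresql', 'mongodb', 'redis', 'elasticsearch']),
--         ('Web Technologies', ['html', 'css', 'react', 'angular', 'vue', 'node.js'])]):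
--     for _k in _kws:
--         _KEYWORD_INFO[_k] = (_i, _cat)
--
-- _MAXLEN = max(len(k) for k in _KEYWORD_INFO)  # 16
--
--
-- def _categorize_skill(skill: str) -> str:
--     # Scan every substring of the lowered skill (capped at the longest keyword)
--     # and look it up in a keyword->(priority, category) dict; keep the hit with
--     # the smallest priority.  No per-keyword substring search at all.
--     s = skill.lower()
--     best = (6, 'Other')
--     for i in range(len(s)):
--         for L in range(1, min(_MAXLEN, len(s) - i) + 1):
--             hit = _KEYWORD_INFO.get(s[i:i + L])
--             if hit is not None and hit[0] < best[0]:
--                 best = hit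
--     return best[1]
-- ===== Notes on version B (the rewrite author's own statement) =====
-- stated objective: alternative
-- what changed: Instead of testing each of the 35 keywords for substring containment in the lowered skill, B enumerates every substring of the lowered skill (capped at the longest keyword length) and looks each up in a keyword->(priority,category) dictionary built once, keeping the hit with the smallest category priority.
import Mathlib
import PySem

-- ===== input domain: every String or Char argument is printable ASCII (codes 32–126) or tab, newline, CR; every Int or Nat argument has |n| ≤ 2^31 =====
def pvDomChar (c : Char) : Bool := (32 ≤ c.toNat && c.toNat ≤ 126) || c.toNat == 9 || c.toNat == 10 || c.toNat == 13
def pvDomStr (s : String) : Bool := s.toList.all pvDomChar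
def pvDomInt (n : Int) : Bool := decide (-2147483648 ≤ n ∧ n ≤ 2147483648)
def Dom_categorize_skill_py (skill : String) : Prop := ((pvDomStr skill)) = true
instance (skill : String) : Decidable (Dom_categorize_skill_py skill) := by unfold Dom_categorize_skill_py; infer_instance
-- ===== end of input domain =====

-- B replaces A's per-keyword substring searches by a single scan over the substrings of the
-- lowered skill (capped at the longest keyword), each looked up in a keyword → (priority,
-- category) dictionary, keeping the lowest-priority hit (alternative algorithm, same result).

-- ===== PORT A =====
def categorize_skill_py (skill : String) : String :=
  let skill_lower := PySem.Str.lower skill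
  if ["python", "java", "javascript", "sql", "r", "scala", "go", "c++", "c#"].any (fun tech => PySem.Str.isIn tech skill_lower) then
    "Programming Languages"
  else if ["machine learning", "ml", "deep learning", "data science", "analytics"].any (fun tech => PySem.Str.isIn tech skill_lower) then
    "Data Science & ML"
  else if ["tableau", "power bi", "excel", "matplotlib", "seaborn"].any (fun tech => PySem.Str.isIn tech skill_lower) then
    "Visualization & BI"
  else if ["aws", "azure", "gcp", "docker", "kubernetes"].any (fun tech => PySem.Str.isIn tech skill_lower) then
    "Cloud & DevOps"
  else if ["mysql", "postgresql", "mongodb", "redis", "elasticsearch"].any (fun tech => PySem.Str.isIn tech skill_lower) then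
    "Databases"
  else if ["html", "css", "react", "angular", "vue", "node.js"].any (fun tech => PySem.Str.isIn tech skill_lower) then
    "Web Technologies"
  else
    "Other"

-- ===== PORT B =====
-- Source B's module-level _KEYWORD_INFO dict, keyword → (priority, category), in build order.
def pvEntries : List (String × (Int × String)) :=
  [("python", (0, "Programming Languages")), ("java", (0, "Programming Languages")),
   ("javascript", (0, "Programming Languages")), ("sql", (0, "Programming Languages")),
   ("r", (0, "Programming Languages")), ("scala", (0, "Programming Languages")),
   ("go", (0, "Programming Languages")), ("c++", (0, "Programming Languages")),
   ("c#", (0, "Programming Languages")),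
   ("machine learning", (1, "Data Science & ML")), ("ml", (1, "Data Science & ML")),
   ("deep learning", (1, "Data Science & ML")), ("data science", (1, "Data Science & ML")),
   ("analytics", (1, "Data Science & ML")),
   ("tableau", (2, "Visualization & BI")), ("power bi", (2, "Visualization & BI")),
   ("excel", (2, "Visualization & BI")), ("matplotlib", (2, "Visualization & BI")),
   ("seaborn", (2, "Visualization & BI")),
   ("aws", (3, "Cloud & DevOps")), ("azure", (3, "Cloud & DevOps")),
   ("gcp", (3, "Cloud & DevOps")), ("docker", (3, "Cloud & DevOps")),
   ("kubernetes", (3, "Cloud & DevOps")),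
   ("mysql", (4, "Databases")), ("postgresql", (4, "Databases")),
   ("mongodb", (4, "Databases")), ("redis", (4, "Databases")),
   ("elasticsearch", (4, "Databases")),
   ("html", (5, "Web Technologies")), ("css", (5, "Web Technologies")),
   ("react", (5, "Web Technologies")), ("angular", (5, "Web Technologies")),
   ("vue", (5, "Web Technologies")), ("node.js", (5, "Web Technologies"))]

def pvKw : PySem.Dict String (Int × String) := PySem.Dict.ofList pvEntries

-- Source B's _MAXLEN = max(len(k) for k in _KEYWORD_INFO) = 16, computed once at module load.
def pvMaxLen : Int := 16

def categorize_skill_py_alt (skill : String) : String :=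
  let s := PySem.Str.lower skill
  let best :=
    (PySem.List.pyRange 0 (PySem.Str.len s) 1).foldl (fun best i =>
      (PySem.List.pyRange 1 (min pvMaxLen (PySem.Str.len s - i) + 1) 1).foldl (fun best L =>
        match PySem.Dict.get? pvKw (PySem.Str.slice s (some i) (some (i + L))) with
        | some hit => if hit.1 < best.1 then hit else best
        | none => best) best) ((6 : Int), "Other")
  best.2

-- ===== PRECONDITION & SPEC =====
def Spec_categorize_skill_py (skill : String) (out : String) : Prop := out = categorize_skill_py_alt skill
instance (skill : String) (out : String) : Decidable (Spec_categorize_skill_py skill out) := by unfold Spec_categorize_skill_py; infer_instance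

-- ===== CLAIM (what is proved, stated in full; the proofs are below) =====
def Claim_equal_categorize_skill_py : Prop := ∀ (skill : String), Dom_categorize_skill_py skill → Spec_categorize_skill_py skill (categorize_skill_py skill)

-- ===== LEMMAS AND PROOFS =====

-- a fold that updates only on `some` is a fold over the filterMap
theorem pvFoldlMatchFilterMap :
    ∀ (xs : List String) (b : Int × String),
      xs.foldl (fun best k =>
          match PySem.Dict.get? pvKw k with
          | some hit => if hit.1 < best.1 then hit else best
          | none => best) b
        = (xs.filterMap (PySem.Dict.get? pvKw)).foldl (fun b c => if c.1 < b.1 then c else b) b := by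
  intro xs
  induction xs with
  | nil => intro b; rfl
  | cons x t ih =>
    intro b
    cases hx : PySem.Dict.get? pvKw x <;> simp [hx, ih]

-- generic: a fold whose body is itself a fold is a fold over the flatMap
theorem pvFoldlFoldlFlatMap {α β γ : Type} (g : α → List β) (f : γ → β → γ) :
    ∀ (xs : List α) (b : γ),
      xs.foldl (fun b x => (g x).foldl f b) b = (xs.flatMap g).foldl f b := by
  intro xs
  induction xs with
  | nil => intro b; rfl
  | cons x t ih => intro b; simp [List.flatMap_cons, List.foldl_append, ih]

-- the candidate list B effectively minimises over
def pvCands (s : String) : List (Int × String) :=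
  ((PySem.List.pyRange 0 (PySem.Str.len s) 1).flatMap (fun i =>
     (PySem.List.pyRange 1 (min pvMaxLen (PySem.Str.len s - i) + 1) 1).map (fun L =>
        PySem.Str.slice s (some i) (some (i + L))))).filterMap (PySem.Dict.get? pvKw)

theorem pvAltEq (skill : String) :
    categorize_skill_py_alt skill
      = ((pvCands (PySem.Str.lower skill)).foldl
           (fun b c => if c.1 < b.1 then c else b) ((6 : Int), "Other")).2 := by
  unfold categorize_skill_py_alt pvCands
  simp only []
  have hinner : (fun (best : Int × String) (i : Int) =>
      (PySem.List.pyRange 1 (min pvMaxLen (PySem.Str.len (PySem.Str.lower skill) - i) + 1) 1).foldl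
        (fun best L =>
          match PySem.Dict.get? pvKw (PySem.Str.slice (PySem.Str.lower skill) (some i) (some (i + L))) with
          | some hit => if hit.1 < best.1 then hit else best
          | none => best) best)
    = (fun (best : Int × String) (i : Int) =>
      ((PySem.List.pyRange 1 (min pvMaxLen (PySem.Str.len (PySem.Str.lower skill) - i) + 1) 1).map
          (fun L => PySem.Str.slice (PySem.Str.lower skill) (some i) (some (i + L)))).foldl
        (fun best k =>
          match PySem.Dict.get? pvKw k with
          | some hit => if hit.1 < best.1 then hit else best
          | none => best) best) := by
    funext best i
    rw [List.foldl_map]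
  rw [hinner, pvFoldlFoldlFlatMap,
      pvFoldlMatchFilterMap]

-- characterisation of the running minimum
theorem pvFoldlBest (cs : List (Int × String)) :
    ∀ b : Int × String,
      ((cs.foldl (fun b c => if c.1 < b.1 then c else b) b) = b
         ∨ (cs.foldl (fun b c => if c.1 < b.1 then c else b) b) ∈ cs)
      ∧ (cs.foldl (fun b c => if c.1 < b.1 then c else b) b).1 ≤ b.1
      ∧ ∀ c ∈ cs, (cs.foldl (fun b c => if c.1 < b.1 then c else b) b).1 ≤ c.1 := by
  induction cs with
  | nil => intro b; simp
  | cons c t ih =>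
    intro b
    simp only [List.foldl_cons, List.mem_cons]
    obtain ⟨hmem, hle, hall⟩ := ih (if c.1 < b.1 then c else b)
    refine ⟨?_, ?_, ?_⟩
    · rcases hmem with h | h
      · rw [h]; split_ifs with hc
        · exact Or.inr (Or.inl rfl)
        · exact Or.inl rfl
      · exact Or.inr (Or.inr h)
    · refine le_trans hle ?_
      split_ifs with hc <;> omega
    · intro d hd
      rcases hd with h | h
      · subst h
        refine le_trans hle ?_
        split_ifs with hc <;> omega
      · exact hall d h

set_option maxRecDepth 8192 in
theorem pvItemsKw : pvKw.items = pvEntries := by decide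

theorem pvGet?SomeMem {k : String} {pr : Int × String}
    (h : PySem.Dict.get? pvKw k = some pr) : (k, pr) ∈ pvEntries := by
  unfold PySem.Dict.get? at h
  rw [pvItemsKw] at h
  obtain ⟨e, he, h2⟩ := Option.map_eq_some_iff.mp h
  have hk : e.1 = k := by
    have := List.find?_some he
    simpa using this
  have hm := List.mem_of_find?_eq_some he
  have : e = (k, pr) := by
    cases e; simp_all
  rwa [this] at hm

theorem pvFindKey {k : String} {pr : Int × String} :
    ∀ (l : List (String × (Int × String))), (l.map Prod.fst).Nodup → (k, pr) ∈ l →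
      l.find? (fun p => p.1 == k) = some (k, pr) := by
  intro l
  induction l with
  | nil => intro _ h; simp at h
  | cons e t ih =>
    intro hnd hm
    simp only [List.map_cons, List.nodup_cons] at hnd
    rcases List.mem_cons.mp hm with h | h
    · rw [← h]; simp [List.find?_cons_of_pos]
    · have hne : (e.1 == k) = false := by
        simp only [beq_eq_false_iff_ne, ne_eq]
        intro hb
        exact hnd.1 (hb ▸ (List.mem_map.mpr ⟨(k, pr), h, rfl⟩))
      rw [List.find?_cons, hne]
      exact ih hnd.2 h

theorem pvMemGet?Some {k : String} {pr : Int × String}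
    (h : (k, pr) ∈ pvEntries) : PySem.Dict.get? pvKw k = some pr := by
  unfold PySem.Dict.get?
  rw [pvItemsKw, pvFindKey pvEntries (by decide) h]
  rfl

-- every keyword has length between 1 and 16
theorem pvEntryLen : ∀ e ∈ pvEntries, 1 ≤ e.1.toList.length ∧ e.1.toList.length ≤ 16 := by
  decide

theorem pvCandsIff (s : String) (pr : Int × String) :
    pr ∈ pvCands s ↔ ∃ k, (k, pr) ∈ pvEntries ∧ PySem.Str.isIn k s = true := by
  unfold pvCands
  rw [List.mem_filterMap]
  constructor
  · rintro ⟨key, hkey, hget⟩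
    refine ⟨key, pvGet?SomeMem hget, ?_⟩
    obtain ⟨i, hi, hkey2⟩ := List.mem_flatMap.mp hkey
    obtain ⟨L, hL, hkeq⟩ := List.mem_map.mp hkey2
    rw [PySem.List.mem_pyRange_one] at hi hL
    rw [PySem.Str.isIn_iff_infix, ← hkeq, PySem.Str.toList_slice,
        PySem.Chars.slice_eq_listSlice,
        PySem.List.slice_toNat _ hi.1 (by omega)]
    exact ((List.take_prefix _ _).isInfix).trans ((List.drop_suffix _ _).isInfix)
  · rintro ⟨k, hmem, hisin⟩
    obtain ⟨j, hpre⟩ := (PySem.Chars.exists_prefix_drop_iff_isIn k.toList s.toList).mpr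
      (by simpa using hisin)
    have h1 : 1 ≤ k.toList.length := by simpa using (pvEntryLen _ hmem).1
    have h16 : k.toList.length ≤ 16 := by simpa using (pvEntryLen _ hmem).2
    have hsl : s.toList.length = s.length := by simp
    have hkl : k.toList.length = k.length := by simp
    have hlen : k.toList.length ≤ s.toList.length - j := by
      simpa using hpre.length_le
    have hj : j < s.toList.length := by omega
    have hjk : j + k.toList.length ≤ s.toList.length := by omega
    refine ⟨PySem.Str.slice s (some (j : Int)) (some ((j : Int) + (k.toList.length : Int))), ?_, ?_⟩
    · refine List.mem_flatMap.mpr ⟨(j : Int), ?_, ?_⟩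
      · rw [PySem.List.mem_pyRange_one]
        simp [PySem.Str.len_eq]
        omega
      · refine List.mem_map.mpr ⟨(k.toList.length : Int), ?_, rfl⟩
        rw [PySem.List.mem_pyRange_one]
        constructor
        · omega
        · simp [PySem.Str.len_eq, pvMaxLen]
          omega
    · have hkeyeq : PySem.Str.slice s (some (j : Int)) (some ((j : Int) + (k.toList.length : Int))) = k := by
        rw [← String.toList_inj, PySem.Str.toList_slice, PySem.Chars.slice_eq_listSlice,
            PySem.List.slice_toNat _ (by omega) (by omega)]
        have : ((j : Int) + (k.toList.length : Int)).toNat - ((j : Int)).toNat = k.toList.length := by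
          omega
        rw [this]
        have : ((j : Int)).toNat = j := by omega
        rw [this]
        exact (List.prefix_iff_eq_take.mp hpre).symm
      rw [hkeyeq]
      exact pvMemGet?Some hmem

-- the six keyword lists, indexed by priority (proof-side helper)
def pvKwsOf (c : Int) : List String :=
  if c = 0 then ["python", "java", "javascript", "sql", "r", "scala", "go", "c++", "c#"]
  else if c = 1 then ["machine learning", "ml", "deep learning", "data science", "analytics"]
  else if c = 2 then ["tableau", "power bi", "excel", "matplotlib", "seaborn"]
  else if c = 3 then ["aws", "azure", "gcp", "docker", "kubernetes"]
  else if c = 4 then ["mysql", "postgresql", "mongodb", "redis", "elasticsearch"]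
  else if c = 5 then ["html", "css", "react", "angular", "vue", "node.js"]
  else []

def pvCatOf (c : Int) : String :=
  if c = 0 then "Programming Languages"
  else if c = 1 then "Data Science & ML"
  else if c = 2 then "Visualization & BI"
  else if c = 3 then "Cloud & DevOps"
  else if c = 4 then "Databases"
  else if c = 5 then "Web Technologies"
  else "Other"

theorem pvEntryChar : ∀ e ∈ pvEntries,
    0 ≤ e.2.1 ∧ e.2.1 < 6 ∧ e.1 ∈ pvKwsOf e.2.1 ∧ e.2.2 = pvCatOf e.2.1 := by
  decide

theorem pvKwsMemEntry : ∀ (c : Int), ∀ k ∈ pvKwsOf c, (k, (c, pvCatOf c)) ∈ pvEntries := by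
  intro c k hk
  by_cases h0 : c = 0
  · subst h0; simp [pvKwsOf] at hk
    rcases hk with rfl | rfl | rfl | rfl | rfl | rfl | rfl | rfl | rfl <;> decide
  by_cases h1 : c = 1
  · subst h1; simp [pvKwsOf] at hk
    rcases hk with rfl | rfl | rfl | rfl | rfl <;> decide
  by_cases h2 : c = 2
  · subst h2; simp [pvKwsOf] at hk
    rcases hk with rfl | rfl | rfl | rfl | rfl <;> decide
  by_cases h3 : c = 3
  · subst h3; simp [pvKwsOf] at hk
    rcases hk with rfl | rfl | rfl | rfl | rfl <;> decide
  by_cases h4 : c = 4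
  · subst h4; simp [pvKwsOf] at hk
    rcases hk with rfl | rfl | rfl | rfl | rfl <;> decide
  by_cases h5 : c = 5
  · subst h5; simp [pvKwsOf] at hk
    rcases hk with rfl | rfl | rfl | rfl | rfl | rfl <;> decide
  · exfalso
    simp [pvKwsOf, h0, h1, h2, h3, h4, h5] at hk

-- a matched category gives a candidate
theorem pvCondCand (s : String) (c : Int)
    (h : (pvKwsOf c).any (fun tech => PySem.Str.isIn tech s) = true) :
    (c, pvCatOf c) ∈ pvCands s := by
  obtain ⟨k, hk, hin⟩ := List.any_eq_true.mp h
  exact (pvCandsIff s _).mpr ⟨k, pvKwsMemEntry c k hk, hin⟩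

-- ===== VERDICT (by name: the statement is the Claim_ definition above) =====
theorem categorize_skill_py_spec : Claim_equal_categorize_skill_py := by
  intro skill _
  unfold Spec_categorize_skill_py
  rw [pvAltEq]
  set s := PySem.Str.lower skill with hs
  set r := ((pvCands s).foldl (fun b c => if c.1 < b.1 then c else b) ((6 : Int), "Other")) with hr
  obtain ⟨hmem, hle, hall⟩ := pvFoldlBest (pvCands s) ((6 : Int), "Other")
  rw [← hr] at hmem hle hall
  unfold categorize_skill_py
  rw [← hs]
  simp only []
  have hcand : ∀ pr ∈ pvCands s, 0 ≤ pr.1 ∧ pr.1 < 6 ∧ pr.2 = pvCatOf pr.1 ∧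
      (pvKwsOf pr.1).any (fun tech => PySem.Str.isIn tech s) = true := by
    intro pr hpr
    obtain ⟨k, hmemE, hin⟩ := (pvCandsIff s pr).mp hpr
    obtain ⟨ha, hb, hc, hd⟩ := pvEntryChar _ hmemE
    exact ⟨ha, hb, hd, List.any_eq_true.mpr ⟨k, hc, hin⟩⟩
  split_ifs with h0 h1 h2 h3 h4 h5
  · -- c = 0
    have hc0 := pvCondCand s 0 (by simpa [pvKwsOf] using h0)
    have hr0 := hall _ hc0
    rcases hmem with he | he
    · rw [he] at hr0; norm_num at hr0
    · obtain ⟨ha, hb, hcat, hcond⟩ := hcand r he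
      have : r.1 = 0 := by omega
      rw [hcat, this]; rfl
  · have hc1 := pvCondCand s 1 (by simpa [pvKwsOf] using h1)
    have hr1 := hall _ hc1
    rcases hmem with he | he
    · rw [he] at hr1; norm_num at hr1
    · obtain ⟨ha, hb, hcat, hcond⟩ := hcand r he
      have hne : r.1 ≠ 0 := by
        intro h; rw [h] at hcond; simp [pvKwsOf] at hcond; exact h0 (by simpa using hcond)
      have : r.1 = 1 := by omega
      rw [hcat, this]; rfl
  · have hc2 := pvCondCand s 2 (by simpa [pvKwsOf] using h2)
    have hr2 := hall _ hc2
    rcases hmem with he | he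
    · rw [he] at hr2; norm_num at hr2
    · obtain ⟨ha, hb, hcat, hcond⟩ := hcand r he
      have hne0 : r.1 ≠ 0 := by
        intro h; rw [h] at hcond; simp [pvKwsOf] at hcond; exact h0 (by simpa using hcond)
      have hne1 : r.1 ≠ 1 := by
        intro h; rw [h] at hcond; simp [pvKwsOf] at hcond; exact h1 (by simpa using hcond)
      have : r.1 = 2 := by omega
      rw [hcat, this]; rfl
  · have hc3 := pvCondCand s 3 (by simpa [pvKwsOf] using h3)
    have hr3 := hall _ hc3
    rcases hmem with he | he
    · rw [he] at hr3; norm_num at hr3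
    · obtain ⟨ha, hb, hcat, hcond⟩ := hcand r he
      have hne0 : r.1 ≠ 0 := by
        intro h; rw [h] at hcond; simp [pvKwsOf] at hcond; exact h0 (by simpa using hcond)
      have hne1 : r.1 ≠ 1 := by
        intro h; rw [h] at hcond; simp [pvKwsOf] at hcond; exact h1 (by simpa using hcond)
      have hne2 : r.1 ≠ 2 := by
        intro h; rw [h] at hcond; simp [pvKwsOf] at hcond; exact h2 (by simpa using hcond)
      have : r.1 = 3 := by omega
      rw [hcat, this]; rfl
  · have hc4 := pvCondCand s 4 (by simpa [pvKwsOf] using h4)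
    have hr4 := hall _ hc4
    rcases hmem with he | he
    · rw [he] at hr4; norm_num at hr4
    · obtain ⟨ha, hb, hcat, hcond⟩ := hcand r he
      have hne0 : r.1 ≠ 0 := by
        intro h; rw [h] at hcond; simp [pvKwsOf] at hcond; exact h0 (by simpa using hcond)
      have hne1 : r.1 ≠ 1 := by
        intro h; rw [h] at hcond; simp [pvKwsOf] at hcond; exact h1 (by simpa using hcond)
      have hne2 : r.1 ≠ 2 := by
        intro h; rw [h] at hcond; simp [pvKwsOf] at hcond; exact h2 (by simpa using hcond)
      have hne3 : r.1 ≠ 3 := by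
        intro h; rw [h] at hcond; simp [pvKwsOf] at hcond; exact h3 (by simpa using hcond)
      have : r.1 = 4 := by omega
      rw [hcat, this]; rfl
  · have hc5 := pvCondCand s 5 (by simpa [pvKwsOf] using h5)
    have hr5 := hall _ hc5
    rcases hmem with he | he
    · rw [he] at hr5; norm_num at hr5
    · obtain ⟨ha, hb, hcat, hcond⟩ := hcand r he
      have hne0 : r.1 ≠ 0 := by
        intro h; rw [h] at hcond; simp [pvKwsOf] at hcond; exact h0 (by simpa using hcond)
      have hne1 : r.1 ≠ 1 := by
        intro h; rw [h] at hcond; simp [pvKwsOf] at hcond; exact h1 (by simpa using hcond)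
      have hne2 : r.1 ≠ 2 := by
        intro h; rw [h] at hcond; simp [pvKwsOf] at hcond; exact h2 (by simpa using hcond)
      have hne3 : r.1 ≠ 3 := by
        intro h; rw [h] at hcond; simp [pvKwsOf] at hcond; exact h3 (by simpa using hcond)
      have hne4 : r.1 ≠ 4 := by
        intro h; rw [h] at hcond; simp [pvKwsOf] at hcond; exact h4 (by simpa using hcond)
      have : r.1 = 5 := by omega
      rw [hcat, this]; rfl
  · -- nothing matched
    rcases hmem with he | he
    · rw [he]
    · obtain ⟨ha, hb, hcat, hcond⟩ := hcand r he
      exfalso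
      have hne0 : r.1 ≠ 0 := by
        intro h; rw [h] at hcond; simp [pvKwsOf] at hcond; exact h0 (by simpa using hcond)
      have hne1 : r.1 ≠ 1 := by
        intro h; rw [h] at hcond; simp [pvKwsOf] at hcond; exact h1 (by simpa using hcond)
      have hne2 : r.1 ≠ 2 := by
        intro h; rw [h] at hcond; simp [pvKwsOf] at hcond; exact h2 (by simpa using hcond)
      have hne3 : r.1 ≠ 3 := by
        intro h; rw [h] at hcond; simp [pvKwsOf] at hcond; exact h3 (by simpa using hcond)
      have hne4 : r.1 ≠ 4 := by
        intro h; rw [h] at hcond; simp [pvKwsOf] at hcond; exact h4 (by simpa using hcond)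
      have hne5 : r.1 ≠ 5 := by
        intro h; rw [h] at hcond; simp [pvKwsOf] at hcond; exact h5 (by simpa using hcond)
      omega
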